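-- pv_equiv track=rewrite | github.com/bahadirisik/Samurai_Sudoku_Solver | Sudoku/Sudoku/a.py | son_durum
-- ===== SOURCE A (Python) =====
-- def son_durum(dizi,dizi1,dizi2,dizi3):
--     for i in dizi:
--         for j in dizi1:
--             if i == j :
--                 for x in dizi2:
--                     if i ==x:
--                         for u in dizi3:
--                             if i==u:
--                                 return i
-- ===== SOURCE B (Python) =====
-- def son_durum(dizi, dizi1, dizi2, dizi3):
--     # Staged filtering: repeatedly restrict the candidate list to elements
--     # present in the next list (hashed), then return the first survivor.
--     cand = dizi
--     for other in (dizi1, dizi2, dizi3):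
--         s = set(other)
--         cand = [v for v in cand if v in s]
--     return cand[0] if cand else None
-- ===== Notes on version B (the rewrite author's own statement) =====
-- stated objective: faster
-- what changed: Replaces the four nested list scans with three staged filtering passes (each shrinking the candidate list via a hash set of the next list) followed by taking the head of the surviving candidates, instead of testing each element of dizi against all three lists at once.
import Mathlib
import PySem

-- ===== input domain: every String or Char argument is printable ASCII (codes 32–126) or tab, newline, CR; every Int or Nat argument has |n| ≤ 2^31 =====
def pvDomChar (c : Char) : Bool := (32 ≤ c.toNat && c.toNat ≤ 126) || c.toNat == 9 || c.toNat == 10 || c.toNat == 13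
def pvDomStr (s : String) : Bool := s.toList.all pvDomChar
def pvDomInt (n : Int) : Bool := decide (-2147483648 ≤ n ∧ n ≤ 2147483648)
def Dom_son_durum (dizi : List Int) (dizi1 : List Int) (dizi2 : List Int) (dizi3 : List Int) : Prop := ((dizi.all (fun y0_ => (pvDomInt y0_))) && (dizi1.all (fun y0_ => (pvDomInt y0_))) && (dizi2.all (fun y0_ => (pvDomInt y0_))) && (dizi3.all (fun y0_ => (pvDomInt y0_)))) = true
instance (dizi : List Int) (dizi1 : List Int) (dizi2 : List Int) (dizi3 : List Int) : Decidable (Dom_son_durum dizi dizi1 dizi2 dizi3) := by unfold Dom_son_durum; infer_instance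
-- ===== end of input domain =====

-- B replaces A's four nested scans by three staged filtering passes over a shrinking candidate list, then takes the head (objective: faster).

-- ===== PORT A =====
-- innermost loop: 'for u in dizi3: if i == u: return i'
def sdLoop3 (i : Int) : List Int → Option Int
  | [] => none
  | u :: rest => if i = u then some i else sdLoop3 i rest

-- 'for x in dizi2: if i == x: <loop over dizi3>'
def sdLoop2 (i : Int) (dizi3 : List Int) : List Int → Option Int
  | [] => none
  | x :: rest =>
    if i = x then
      match sdLoop3 i dizi3 with
      | some r => some r
      | none => sdLoop2 i dizi3 rest
    else sdLoop2 i dizi3 rest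

-- 'for j in dizi1: if i == j: <loop over dizi2>'
def sdLoop1 (i : Int) (dizi2 dizi3 : List Int) : List Int → Option Int
  | [] => none
  | j :: rest =>
    if i = j then
      match sdLoop2 i dizi3 dizi2 with
      | some r => some r
      | none => sdLoop1 i dizi2 dizi3 rest
    else sdLoop1 i dizi2 dizi3 rest

def son_durum (dizi : List Int) (dizi1 : List Int) (dizi2 : List Int) (dizi3 : List Int) : Option Int :=
  match dizi with
  | [] => none
  | i :: rest =>
    match sdLoop1 i dizi2 dizi3 dizi1 with
    | some r => some r
    | none => son_durum rest dizi1 dizi2 dizi3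

-- ===== PORT B =====
-- staged filtering: fold over the three lists, shrinking the candidate list each pass
def son_durum_alt (dizi : List Int) (dizi1 : List Int) (dizi2 : List Int) (dizi3 : List Int) : Option Int :=
  let cand := [dizi1, dizi2, dizi3].foldl
    (fun c other =>
      let s := PySem.Set.ofList other
      c.filter (fun v => PySem.Set.contains s v)) dizi
  cand.head?

-- ===== PRECONDITION & SPEC =====
def Spec_son_durum (dizi : List Int) (dizi1 : List Int) (dizi2 : List Int) (dizi3 : List Int) (out : Option Int) : Prop := out = son_durum_alt dizi dizi1 dizi2 dizi3
instance (dizi : List Int) (dizi1 : List Int) (dizi2 : List Int) (dizi3 : List Int) (out : Option Int) : Decidable (Spec_son_durum dizi dizi1 dizi2 dizi3 out) := by unfold Spec_son_durum; infer_instance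

-- ===== CLAIM (what is proved, stated in full; the proofs are below) =====
def Claim_equal_son_durum : Prop := ∀ (dizi : List Int) (dizi1 : List Int) (dizi2 : List Int) (dizi3 : List Int), Dom_son_durum dizi dizi1 dizi2 dizi3 → Spec_son_durum dizi dizi1 dizi2 dizi3 (son_durum dizi dizi1 dizi2 dizi3)

-- ===== LEMMAS AND PROOFS =====

theorem sdLoop3_eq (i : Int) (l : List Int) :
    sdLoop3 i l = if i ∈ l then some i else none := by
  induction l with
  | nil => simp [sdLoop3]
  | cons u rest ih =>
    simp only [sdLoop3, ih, List.mem_cons]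
    by_cases h : i = u <;> simp [h]

theorem sdLoop2_eq (i : Int) (d3 l : List Int) :
    sdLoop2 i d3 l = if i ∈ l ∧ i ∈ d3 then some i else none := by
  induction l with
  | nil => simp [sdLoop2]
  | cons x rest ih =>
    simp only [sdLoop2, sdLoop3_eq, ih, List.mem_cons]
    by_cases hx : i = x <;> by_cases h3 : i ∈ d3 <;> simp_all

theorem sdLoop1_eq (i : Int) (d2 d3 l : List Int) :
    sdLoop1 i d2 d3 l = if i ∈ l ∧ i ∈ d2 ∧ i ∈ d3 then some i else none := by
  induction l with
  | nil => simp [sdLoop1]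
  | cons j rest ih =>
    simp only [sdLoop1, sdLoop2_eq, ih, List.mem_cons]
    by_cases hj : i = j <;> by_cases h2 : i ∈ d2 <;> by_cases h3 : i ∈ d3 <;> simp_all

theorem set_contains_eq (xs : List Int) (v : Int) :
    PySem.Set.contains (PySem.Set.ofList xs) v = decide (v ∈ xs) := by
  by_cases h : v ∈ xs <;>
    simp [h, PySem.Set.mem_ofList]

-- B's staged filtering collapses to one filter by the conjunction of the three memberships
theorem alt_eq_filter (dizi d1 d2 d3 : List Int) :
    son_durum_alt dizi d1 d2 d3 =
      (dizi.filter (fun v => decide (v ∈ d1) && decide (v ∈ d2) && decide (v ∈ d3))).head? := by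
  unfold son_durum_alt
  simp only [List.foldl, set_contains_eq, List.filter_filter]
  congr 1
  apply List.filter_congr
  intro v _
  simp [Bool.and_comm, Bool.and_left_comm]

theorem son_durum_eq_alt (dizi dizi1 dizi2 dizi3 : List Int) :
    son_durum dizi dizi1 dizi2 dizi3 = son_durum_alt dizi dizi1 dizi2 dizi3 := by
  rw [alt_eq_filter]
  induction dizi with
  | nil => simp [son_durum]
  | cons i rest ih =>
    simp only [son_durum, sdLoop1_eq, List.filter_cons] at *
    by_cases h1 : i ∈ dizi1 <;> by_cases h2 : i ∈ dizi2 <;> by_cases h3 : i ∈ dizi3 <;>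
      simp [h1, h2, h3, ih]

-- ===== VERDICT (by name: the statement is the Claim_ definition above) =====
theorem son_durum_spec : Claim_equal_son_durum := by
  intro dizi dizi1 dizi2 dizi3 _
  exact son_durum_eq_alt dizi dizi1 dizi2 dizi3
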